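-- pv_equiv track=rewrite | github.com/thotalakshmimounika/IntermediateDSA | Stacks and queues/queue/Maximum frequency stack.py | solve
-- ===== SOURCE A (Python) =====
-- def solve(a):
--     n = len(a)
--     d = {}
--     elfeqmap = {}
--     maxfe = 0
--     ans = []
--     for i in range(n):
--         k = a[i][0]
--         val = a[i][1]
--         if k == 1:
--             ans.append(-1)
--             if val not in d:
--                 d[val] = 1
--             else:
--                 d[val] += 1
--             if d[val] in elfeqmap:
--                 elfeqmap[d[val]].append(val)
--             else:
--                 elfeqmap[d[val]] = [val]
--             maxfe = max(maxfe, d[val])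
--         else:
--             ele = elfeqmap[maxfe].pop()
--             if len(elfeqmap[maxfe])==0:
--                 maxfe-=1
--             d[ele] -= 1
--             ans.append(ele)
--     return ans
-- ===== SOURCE B (Python) =====
-- def _remove_last_max(stack, m):
--     # remove the last entry whose frequency is m (the maximum); return (entry, remaining stack)
--     f, v = stack[-1]
--     if f == m:
--         return (f, v), stack[:-1]
--     e, rest = _remove_last_max(stack[:-1], m)
--     return e, rest + [(f, v)]
--
--
-- def solve(a):
--     cnt = {}
--     stack = []  # live pushes in order, as (frequency at push time, value)
--     ans = []
--     for op in a:
--         if op[0] == 1: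
--             v = op[1]
--             f = cnt.get(v, 0) + 1
--             cnt[v] = f
--             stack.append((f, v))
--             ans.append(-1)
--         else:
--             m = max(f for f, _ in stack)
--             (f, v), stack = _remove_last_max(stack, m)
--             cnt[v] = f - 1
--             ans.append(v)
--     return ans
-- ===== Notes on version B (the rewrite author's own statement) =====
-- stated objective: alternative
-- what changed: Replaces the count-dict + frequency-bucket-dict + running-max bookkeeping with a single flat stack of (push-time frequency, value) pairs: a pop recomputes the maximum frequency and removes the last entry carrying it, so the bucket map and maxfe counter disappear.
import Mathlib
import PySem

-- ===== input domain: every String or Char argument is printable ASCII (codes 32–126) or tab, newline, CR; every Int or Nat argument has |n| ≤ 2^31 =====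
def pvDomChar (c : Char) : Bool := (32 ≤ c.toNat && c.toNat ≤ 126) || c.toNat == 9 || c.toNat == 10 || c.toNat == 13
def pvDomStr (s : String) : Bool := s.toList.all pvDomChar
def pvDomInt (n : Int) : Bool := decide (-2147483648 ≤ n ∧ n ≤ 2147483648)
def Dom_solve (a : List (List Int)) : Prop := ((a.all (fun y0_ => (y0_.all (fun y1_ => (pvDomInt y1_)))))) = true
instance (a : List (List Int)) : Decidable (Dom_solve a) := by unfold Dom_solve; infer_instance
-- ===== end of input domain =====

-- B replaces A's count-dict + frequency-bucket-dict + running-max bookkeeping by a single flat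
-- stack of (push-time frequency, value) pairs; a pop recomputes the max frequency and removes the
-- last entry carrying it (alternative decomposition, not faster).


-- ===== PORT A =====
-- one loop iteration of A; state = (d, elfeqmap, maxfe, ans)
def stepA (s : PySem.Dict Int Int × PySem.Dict Int (List Int) × Int × List Int)
    (op : List Int) : PySem.Dict Int Int × PySem.Dict Int (List Int) × Int × List Int :=
  let d := s.1
  let em := s.2.1
  let maxfe := s.2.2.1
  let ans := s.2.2.2
  let k := PySem.List.pyGetD op 0 0      -- a[i][0]; in range for every input Pre_ admits
  let val := PySem.List.pyGetD op 1 0    -- a[i][1]; in range for every input Pre_ admits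
  if k = 1 then
    let ans := ans ++ [-1]
    let d := if d.contains val = false then d.insert val 1 else d.insert val (d.getD val 0 + 1)
    let c := d.getD val 0
    let em := if em.contains c then em.insert c (em.getD c [] ++ [val]) else em.insert c [val]
    (d, em, max maxfe c, ans)
  else
    -- ele = elfeqmap[maxfe].pop(); KeyError/IndexError excluded by Pre_
    let l := em.getD maxfe []
    let ele := l.getLast?.getD 0
    let em := em.insert maxfe l.dropLast
    let maxfe := if l.dropLast.length = 0 then maxfe - 1 else maxfe
    let d := d.insert ele (d.getD ele 0 - 1)   -- d[ele] -= 1; KeyError excluded by Pre_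
    (d, em, maxfe, ans ++ [ele])

-- 'for i in range(n): … a[i] …' iterates a in order = foldl over a
def solve (a : List (List Int)) : List Int :=
  (a.foldl stepA (PySem.Dict.empty, PySem.Dict.empty, 0, [])).2.2.2

-- ===== PORT B =====
-- _remove_last_max recurses on stack[:-1], i.e. peels entries off the RIGHT end: ported as
-- structural recursion on the REVERSED stack (stack[-1] = head, stack[:-1] = tail,
-- rest + [(f, v)] = (f, v) :: r); the ((0,0), []) base is Python's IndexError, excluded by Pre_.
def rlmB (m : Int) : List (Int × Int) → (Int × Int) × List (Int × Int)
  | [] => ((0, 0), [])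
  | e :: rest =>
    if e.1 = m then (e, rest)
    else
      let r := rlmB m rest
      (r.1, e :: r.2)

-- one loop iteration of B; state = (cnt, stack, ans)
def stepB (s : PySem.Dict Int Int × List (Int × Int) × List Int)
    (op : List Int) : PySem.Dict Int Int × List (Int × Int) × List Int :=
  let cnt := s.1
  let stack := s.2.1
  let ans := s.2.2
  if PySem.List.pyGetD op 0 0 = 1 then
    let v := PySem.List.pyGetD op 1 0
    let f := cnt.getD v 0 + 1
    (cnt.insert v f, stack ++ [(f, v)], ans ++ [-1])
  else
    -- m = max(f for f, _ in stack); ValueError on empty stack excluded by Pre_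
    let m := (PySem.List.max? (stack.map (fun e => e.1)) (fun x => x)).getD 0
    let r := rlmB m stack.reverse
    (cnt.insert r.1.2 (r.1.1 - 1), r.2.reverse, ans ++ [r.1.2])

def solve_alt (a : List (List Int)) : List Int :=
  (a.foldl stepB (PySem.Dict.empty, [], [])).2.2

-- ===== PRECONDITION & SPEC =====
-- Pre_ excludes exactly the inputs on which A raises: an operation shorter than two entries
-- (IndexError on a[i][1]) and a pop with no pushed element available (KeyError on elfeqmap[0]).
def Pre_solve (a : List (List Int)) : Prop :=
  (∀ op ∈ a, 2 ≤ op.length) ∧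
  ∀ i ∈ List.range (a.length + 1),
    (a.take i).countP (fun op => !(op.headD 0 == 1)) ≤ (a.take i).countP (fun op => op.headD 0 == 1)
instance (a : List (List Int)) : Decidable (Pre_solve a) := by unfold Pre_solve; infer_instance

def pvWitness_solve : List (List Int) := [[1, 5], [1, 7], [1, 5], [2, 0], [2, 0]]

def Spec_solve (a : List (List Int)) (out : List Int) : Prop := out = solve_alt a
instance (a : List (List Int)) (out : List Int) : Decidable (Spec_solve a out) := by unfold Spec_solve; infer_instance

-- ===== CLAIM (what is proved, stated in full; the proofs are below) =====
def Claim_equal_solve : Prop := ∀ (a : List (List Int)), Dom_solve a → Pre_solve a → Spec_solve a (solve a)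

-- ===== LEMMAS AND PROOFS =====

def irange (n : Int) : List Int := (List.range n.toNat).map (fun i : Nat => (i : Int) + 1)

lemma irange_succ {n : Int} (h : 0 ≤ n) : irange (n + 1) = irange n ++ [n + 1] := by
  have : (n + 1).toNat = n.toNat + 1 := by omega
  simp [irange, this, List.range_succ]
  omega

lemma mem_irange {x n : Int} : x ∈ irange n ↔ 1 ≤ x ∧ x ≤ n := by
  simp only [irange, List.mem_map, List.mem_range]
  constructor
  · rintro ⟨i, hi, rfl⟩; omega
  · rintro ⟨h1, h2⟩
    exact ⟨(x - 1).toNat, by omega, by omega⟩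

lemma irange_nodup (n : Int) : (irange n).Nodup := by
  refine List.Nodup.map ?_ (List.nodup_range)
  intro i j h
  simp only [add_left_inj, Nat.cast_inj] at h
  exact h

lemma rlmB_skip {m : Int} (wr : List (Int × Int)) {e : Int × Int} (ur : List (Int × Int))
    (h : ∀ x ∈ wr, x.1 ≠ m) (he : e.1 = m) :
    rlmB m (wr ++ e :: ur) = (e, wr ++ ur) := by
  induction wr with
  | nil => simp [rlmB, he]
  | cons x t ih =>
    have hx : x.1 ≠ m := h x (by simp)
    simp only [List.cons_append, rlmB, if_neg hx,
      ih (fun y hy => h y (by simp [hy]))]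

lemma exists_last_with {α : Type} (p : α → Prop) [DecidablePred p] (l : List α)
    (h : ∃ x ∈ l, p x) :
    ∃ u e w, l = u ++ e :: w ∧ p e ∧ ∀ x ∈ w, ¬ p x := by
  induction l with
  | nil => simp at h
  | cons a t ih =>
    by_cases ht : ∃ x ∈ t, p x
    · obtain ⟨u, e, w, rfl, hpe, hw⟩ := ih ht
      exact ⟨a :: u, e, w, rfl, hpe, hw⟩
    · have hpa : p a := by
        obtain ⟨x, hx, hpx⟩ := h
        rcases List.mem_cons.mp hx with rfl | hx
        · exact hpx
        · exact absurd ⟨x, hx, hpx⟩ ht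
      exact ⟨[], a, t, rfl, hpa, fun x hx hpx => ht ⟨x, hx, hpx⟩⟩

def InvS (d : PySem.Dict Int Int) (em : PySem.Dict Int (List Int)) (maxfe : Int)
    (cnt : PySem.Dict Int Int) (stack : List (Int × Int)) : Prop :=
  (∀ v, d.get? v = cnt.get? v) ∧
  (∀ c, em.getD c [] = (stack.filter (fun y => y.1 == c)).map (fun y => y.2)) ∧
  ((stack = [] ∧ maxfe = 0) ∨
    (maxfe ∈ stack.map (fun y => y.1) ∧ ∀ f ∈ stack.map (fun y => y.1), f ≤ maxfe)) ∧
  (∀ v, (stack.filter (fun y => y.2 == v)).map (fun y => y.1) = irange (cnt.getD v 0)) ∧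
  (∀ v, 0 ≤ cnt.getD v 0)

lemma getD_eq_of_get?_eq {d cnt : PySem.Dict Int Int} (h : ∀ v, d.get? v = cnt.get? v)
    (v x : Int) : d.getD v x = cnt.getD v x := by
  rw [PySem.Dict.getD_eq_get?_getD, h, ← PySem.Dict.getD_eq_get?_getD]

lemma inv_push {d : PySem.Dict Int Int} {em : PySem.Dict Int (List Int)} {maxfe : Int}
    {cnt : PySem.Dict Int Int} {stack : List (Int × Int)}
    (I : InvS d em maxfe cnt stack) (v : Int) :
    InvS (d.insert v (d.getD v 0 + 1))
         (em.insert (d.getD v 0 + 1) (em.getD (d.getD v 0 + 1) [] ++ [v]))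
         (max maxfe (d.getD v 0 + 1))
         (cnt.insert v (cnt.getD v 0 + 1))
         (stack ++ [(cnt.getD v 0 + 1, v)]) := by
  obtain ⟨I1, I2, I3, I4, I5⟩ := I
  have hc : d.getD v 0 = cnt.getD v 0 := getD_eq_of_get?_eq I1 v 0
  rw [hc]
  set c := cnt.getD v 0 + 1 with hcdef
  have hc1 : 1 ≤ c := by have := I5 v; omega
  refine ⟨?_, ?_, ?_, ?_, ?_⟩
  · intro w
    rw [PySem.Dict.get?_insert, PySem.Dict.get?_insert]
    split_ifs with h
    · rfl
    · exact I1 w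
  · intro c'
    rw [PySem.Dict.getD_insert]
    by_cases h : c' = c
    · subst h
      rw [if_pos rfl, List.filter_append, List.map_append, I2 c]
      have : List.filter (fun y => y.1 == c) [((c : Int), v)] = [((c : Int), v)] := by simp
      rw [this]
      simp
    · rw [if_neg h, I2 c', List.filter_append, List.map_append]
      have : List.filter (fun y => y.1 == c') [((c : Int), v)] = [] := by
        simp [Ne.symm h]
      rw [this]
      simp
  · right
    rcases I3 with ⟨rfl, rfl⟩ | ⟨hm, hub⟩
    · constructor
      · simp
        omega
      · intro f hf
        simp at hf
        subst hf
        exact le_max_right _ _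
    · constructor
      · rcases le_or_gt c maxfe with h | h
        · rw [max_eq_left h]
          simp only [List.map_append, List.mem_append]
          exact Or.inl hm
        · rw [max_eq_right (le_of_lt h)]
          simp
      · intro f hf
        simp only [List.map_append, List.mem_append] at hf
        rcases hf with hf | hf
        · exact le_trans (hub f hf) (le_max_left _ _)
        · simp at hf
          subst hf
          exact le_max_right _ _
  · intro v'
    rw [PySem.Dict.getD_insert, List.filter_append, List.map_append]
    by_cases h : v' = v
    · subst h
      rw [if_pos rfl, I4 v']
      have : List.filter (fun y => y.2 == v') [((c : Int), v')] = [((c : Int), v')] := by simp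
      rw [this, hcdef, irange_succ (I5 v')]
      simp
    · rw [if_neg h, I4 v']
      have : List.filter (fun y => y.2 == v') [((c : Int), v)] = [] := by
        simp [Ne.symm h]
      rw [this]
      simp
  · intro v'
    rw [PySem.Dict.getD_insert]
    split_ifs with h
    · omega
    · exact I5 v'

lemma irange_concat {n : Int} (h : 1 ≤ n) : irange n = irange (n - 1) ++ [n] := by
  have h2 := irange_succ (n := n - 1) (by omega)
  simpa using h2

lemma getLast?_append_cons_of_ne_nil {l B : List Int} {a : Int} (h : B ≠ []) :
    (l ++ a :: B).getLast? = B.getLast? := by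
  induction B with
  | nil => exact absurd rfl h
  | cons x t ih => cases t <;> simp_all [List.getLast?_append]

lemma inv_pop {d : PySem.Dict Int Int} {em : PySem.Dict Int (List Int)} {maxfe : Int}
    {cnt : PySem.Dict Int Int} {stack : List (Int × Int)}
    (I : InvS d em maxfe cnt stack) (hne : stack ≠ []) :
    ∃ e u w,
      stack = u ++ e :: w ∧
      (PySem.List.max? (stack.map (fun y => y.1)) (fun x => x)).getD 0 = maxfe ∧
      rlmB maxfe stack.reverse = (e, (u ++ w).reverse) ∧
      (em.getD maxfe []).getLast?.getD 0 = e.2 ∧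
      e.1 = maxfe ∧
      d.getD e.2 0 = maxfe ∧
      InvS (d.insert e.2 (d.getD e.2 0 - 1))
           (em.insert maxfe (em.getD maxfe []).dropLast)
           (if (em.getD maxfe []).dropLast.length = 0 then maxfe - 1 else maxfe)
           (cnt.insert e.2 (e.1 - 1))
           (u ++ w) ∧
      (u ++ w).length + 1 = stack.length := by
  obtain ⟨I1, I2, I3, I4, I5⟩ := I
  -- every stacked frequency is at least 1
  have hfreq1 : ∀ x ∈ stack, 1 ≤ x.1 := by
    intro x hx
    have hxm : x.1 ∈ (stack.filter (fun y => y.2 == x.2)).map (fun y => y.1) :=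
      List.mem_map.mpr ⟨x, List.mem_filter.mpr ⟨hx, by simp⟩, rfl⟩
    rw [I4 x.2] at hxm
    exact (mem_irange.mp hxm).1
  rcases I3 with ⟨rfl, _⟩ | ⟨hmm, hub⟩
  · exact absurd rfl hne
  -- the recomputed maximum is maxfe
  have hmax : (PySem.List.max? (stack.map (fun y => y.1)) (fun x => x)).getD 0 = maxfe := by
    have hns : stack.map (fun y => y.1) ≠ [] := by
      simpa using hne
    have hsome : (PySem.List.max? (stack.map (fun y => y.1)) (fun x => x)).isSome := by
      rw [Option.isSome_iff_ne_none]
      intro hn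
      rw [PySem.List.max?_eq_none_iff] at hn
      exact hns hn
    obtain ⟨m0, hm0⟩ := Option.isSome_iff_exists.mp hsome
    rw [hm0, Option.getD_some]
    exact le_antisymm (hub m0 (PySem.List.max?_mem hm0)) (PySem.List.max?_isMax hm0 maxfe hmm)
  -- split the stack at the last entry with frequency maxfe
  obtain ⟨x0, hx0s, hx0⟩ := List.mem_map.mp hmm
  obtain ⟨u, e, w, hS, he1, hwne⟩ :=
    exists_last_with (fun y : Int × Int => y.1 = maxfe) stack ⟨x0, hx0s, hx0⟩
  have hin : ∀ x ∈ u ++ w, x ∈ stack := by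
    intro x hx
    rw [hS]
    rcases List.mem_append.mp hx with h | h
    · exact List.mem_append.mpr (Or.inl h)
    · exact List.mem_append.mpr (Or.inr (List.mem_cons_of_mem _ h))
  have h1mf : 1 ≤ maxfe := he1 ▸ hfreq1 e (hS ▸ List.mem_append.mpr (Or.inr (List.mem_cons_self)))
  -- rlmB finds exactly e
  have hrlm : rlmB maxfe stack.reverse = (e, (u ++ w).reverse) := by
    rw [hS]
    have : (u ++ e :: w).reverse = w.reverse ++ e :: u.reverse := by simp
    rw [this, rlmB_skip w.reverse u.reverse (fun x hx => hwne x (List.mem_reverse.mp hx)) he1]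
    simp
  -- the maxfe bucket
  have hwF : w.filter (fun y => y.1 == maxfe) = [] :=
    List.filter_eq_nil_iff.mpr (fun x hx => by simpa using hwne x hx)
  have hbucket : em.getD maxfe [] = (u.filter (fun y => y.1 == maxfe)).map (fun y => y.2) ++ [e.2] := by
    rw [I2 maxfe, hS, List.filter_append, List.filter_cons, if_pos (by simp [he1]), hwF]
    simp
  have hlast : (em.getD maxfe []).getLast?.getD 0 = e.2 := by
    rw [hbucket, List.getLast?_concat]
    rfl
  have hdrop : (em.getD maxfe []).dropLast = (u.filter (fun y => y.1 == maxfe)).map (fun y => y.2) := by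
    rw [hbucket, List.dropLast_concat]
  -- the count of the popped value is maxfe
  have hfe2 : (u.filter (fun y => y.2 == e.2)).map (fun y => y.1) ++
      maxfe :: (w.filter (fun y => y.2 == e.2)).map (fun y => y.1) = irange (cnt.getD e.2 0) := by
    rw [← I4 e.2, hS, List.filter_append, List.filter_cons, if_pos (by simp)]
    simp [he1]
  have hmfe_mem : maxfe ∈ irange (cnt.getD e.2 0) := by
    rw [← hfe2]
    exact List.mem_append.mpr (Or.inr (List.mem_cons_self))
  have hqge : maxfe ≤ cnt.getD e.2 0 := (mem_irange.mp hmfe_mem).2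
  have hqle : cnt.getD e.2 0 ≤ maxfe := by
    have hq1 : cnt.getD e.2 0 ∈ irange (cnt.getD e.2 0) := mem_irange.mpr ⟨by omega, le_refl _⟩
    rw [← I4 e.2] at hq1
    obtain ⟨x, hxf, hxq⟩ := List.mem_map.mp hq1
    exact hxq ▸ hub x.1 (List.mem_map.mpr ⟨x, (List.mem_filter.mp hxf).1, rfl⟩)
  have hq : cnt.getD e.2 0 = maxfe := le_antisymm hqle hqge
  have hdq : d.getD e.2 0 = maxfe := by rw [getD_eq_of_get?_eq I1, hq]
  -- no later entry of the popped value: its maxfe entry is its last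
  have hVw : w.filter (fun y => y.2 == e.2) = [] := by
    rw [hq] at hfe2
    by_contra hB
    have hBne : (w.filter (fun y => y.2 == e.2)).map (fun y => y.1) ≠ [] := by
      simpa using hB
    have hnd := irange_nodup maxfe
    rw [← hfe2] at hnd
    have hnotin : maxfe ∉ (w.filter (fun y => y.2 == e.2)).map (fun y => y.1) :=
      (List.nodup_cons.mp (hnd.of_append_right)).1
    have hlast2 : (irange maxfe).getLast? = some maxfe := by
      rw [irange_concat h1mf, List.getLast?_concat]
    rw [← hfe2, getLast?_append_cons_of_ne_nil hBne] at hlast2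
    exact hnotin (List.mem_of_getLast? hlast2)
  have hVu : (u.filter (fun y => y.2 == e.2)).map (fun y => y.1) = irange (maxfe - 1) := by
    rw [hq, hVw, irange_concat h1mf] at hfe2
    have := congrArg List.dropLast hfe2
    simpa using this
  refine ⟨e, u, w, hS, hmax, hrlm, hlast, he1, hdq, ⟨?_, ?_, ?_, ?_, ?_⟩, ?_⟩
  · intro v
    rw [PySem.Dict.get?_insert, PySem.Dict.get?_insert]
    split_ifs with h
    · rw [hdq, he1]
    · exact I1 v
  · intro c'
    rw [PySem.Dict.getD_insert, hdrop]
    by_cases h : c' = maxfe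
    · subst h
      rw [if_pos rfl, List.filter_append, List.map_append, hwF]
      simp
    · rw [if_neg h, I2 c', hS, List.filter_append, List.filter_append, List.filter_cons,
        if_neg (by simp [he1, Ne.symm h])]
  · rw [hdrop]
    by_cases hFu : u.filter (fun y => y.1 == maxfe) = []
    · -- the bucket is now empty: maxfe drops by one
      rw [if_pos (by simp [hFu])]
      have hnomax : ∀ x ∈ u ++ w, x.1 ≠ maxfe := by
        intro x hx
        rcases List.mem_append.mp hx with h | h
        · exact by simpa using (List.filter_eq_nil_iff.mp hFu) x h
        · exact hwne x h
      by_cases h2 : 2 ≤ maxfe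
      · right
        constructor
        · have : maxfe - 1 ∈ (u.filter (fun y => y.2 == e.2)).map (fun y => y.1) := by
            rw [hVu]; exact mem_irange.mpr ⟨by omega, le_refl _⟩
          obtain ⟨x, hxf, hxq⟩ := List.mem_map.mp this
          exact List.mem_map.mpr ⟨x, List.mem_append.mpr (Or.inl (List.mem_filter.mp hxf).1), hxq⟩
        · intro f hf
          obtain ⟨x, hx, rfl⟩ := List.mem_map.mp hf
          have := hub x.1 (List.mem_map.mpr ⟨x, hin x hx, rfl⟩)
          have := hnomax x hx
          omega
      · left
        have hm1 : maxfe = 1 := by omega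
        constructor
        · rw [List.eq_nil_iff_forall_not_mem]
          intro x hx
          have ha := hfreq1 x (hin x hx)
          have hb := hub x.1 (List.mem_map.mpr ⟨x, hin x hx, rfl⟩)
          exact hnomax x hx (by omega)
        · omega
    · -- another entry with frequency maxfe survives
      rw [if_neg (by simp [hFu])]
      right
      constructor
      · obtain ⟨x, hx⟩ := List.exists_mem_of_ne_nil _ hFu
        have hxf := List.mem_filter.mp hx
        refine List.mem_map.mpr ⟨x, List.mem_append.mpr (Or.inl hxf.1), by simpa using hxf.2⟩
      · intro f hf
        obtain ⟨x, hx, rfl⟩ := List.mem_map.mp hf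
        exact hub x.1 (List.mem_map.mpr ⟨x, hin x hx, rfl⟩)
  · intro v
    rw [PySem.Dict.getD_insert]
    by_cases h : v = e.2
    · subst h
      rw [if_pos rfl, List.filter_append, List.map_append, hVu, hVw, he1]
      simp
    · rw [if_neg h]
      have heq : List.filter (fun y => y.2 == v) (u ++ w) = List.filter (fun y => y.2 == v) stack := by
        rw [hS, List.filter_append, List.filter_append, List.filter_cons,
          if_neg (by simp [Ne.symm h])]
      rw [heq, I4 v]
  · intro v
    rw [PySem.Dict.getD_insert]
    split_ifs with h
    · rw [he1]; omega
    · exact I5 v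
  · rw [hS]
    simp
    omega

lemma stepA_push {d : PySem.Dict Int Int} {em : PySem.Dict Int (List Int)} {maxfe : Int}
    {ans : List Int} {op : List Int} (hk : PySem.List.pyGetD op 0 0 = 1) :
    stepA (d, em, maxfe, ans) op =
      (d.insert (PySem.List.pyGetD op 1 0) (d.getD (PySem.List.pyGetD op 1 0) 0 + 1),
       em.insert (d.getD (PySem.List.pyGetD op 1 0) 0 + 1)
         (em.getD (d.getD (PySem.List.pyGetD op 1 0) 0 + 1) [] ++ [PySem.List.pyGetD op 1 0]),
       max maxfe (d.getD (PySem.List.pyGetD op 1 0) 0 + 1),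
       ans ++ [-1]) := by
  simp only [stepA, hk, if_pos]
  set val := PySem.List.pyGetD op 1 0 with hval
  have hem : ∀ (c : Int), (if em.contains c = true then em.insert c (em.getD c [] ++ [val])
      else em.insert c [val]) = em.insert c (em.getD c [] ++ [val]) := by
    intro c
    by_cases he : em.contains c
    · simp [he]
    · simp [he, PySem.Dict.getD_of_not_contains _ _ (by simpa using he)]
  by_cases hc : d.contains val
  · simp only [hc, Bool.true_eq_false, ite_false, PySem.Dict.getD_insert_self, hem]
  · have h0 : d.getD val 0 = 0 := PySem.Dict.getD_of_not_contains _ _ (by simpa using hc)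
    simp only [hc, ite_true, PySem.Dict.getD_insert_self, h0, hem]
    norm_num

lemma stepB_push {cnt : PySem.Dict Int Int} {stack : List (Int × Int)} {ans : List Int}
    {op : List Int} (hk : PySem.List.pyGetD op 0 0 = 1) :
    stepB (cnt, stack, ans) op =
      (cnt.insert (PySem.List.pyGetD op 1 0) (cnt.getD (PySem.List.pyGetD op 1 0) 0 + 1),
       stack ++ [(cnt.getD (PySem.List.pyGetD op 1 0) 0 + 1, PySem.List.pyGetD op 1 0)],
       ans ++ [-1]) := by
  simp [stepB, hk]

lemma stepA_pop {d : PySem.Dict Int Int} {em : PySem.Dict Int (List Int)} {maxfe : Int}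
    {ans : List Int} {op : List Int} (hk : ¬ PySem.List.pyGetD op 0 0 = 1) :
    stepA (d, em, maxfe, ans) op =
      (d.insert ((em.getD maxfe []).getLast?.getD 0)
         (d.getD ((em.getD maxfe []).getLast?.getD 0) 0 - 1),
       em.insert maxfe (em.getD maxfe []).dropLast,
       if (em.getD maxfe []).dropLast.length = 0 then maxfe - 1 else maxfe,
       ans ++ [(em.getD maxfe []).getLast?.getD 0]) := by
  simp only [stepA, if_neg hk]

lemma stepB_pop {cnt : PySem.Dict Int Int} {stack : List (Int × Int)} {ans : List Int}
    {op : List Int} (hk : ¬ PySem.List.pyGetD op 0 0 = 1) :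
    stepB (cnt, stack, ans) op =
      (cnt.insert (rlmB ((PySem.List.max? (stack.map (fun y => y.1)) (fun x => x)).getD 0) stack.reverse).1.2
         ((rlmB ((PySem.List.max? (stack.map (fun y => y.1)) (fun x => x)).getD 0) stack.reverse).1.1 - 1),
       (rlmB ((PySem.List.max? (stack.map (fun y => y.1)) (fun x => x)).getD 0) stack.reverse).2.reverse,
       ans ++ [(rlmB ((PySem.List.max? (stack.map (fun y => y.1)) (fun x => x)).getD 0) stack.reverse).1.2]) := by
  simp only [stepB, if_neg hk]

lemma pyGetD_head {op : List Int} (h : 2 ≤ op.length) : PySem.List.pyGetD op 0 0 = op.headD 0 := by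
  cases op with
  | nil => simp at h
  | cons x t => simp [PySem.List.pyGetD, PySem.List.pyGet?, PySem.List.pyIdx?]

lemma inv_empty : InvS PySem.Dict.empty PySem.Dict.empty 0 PySem.Dict.empty [] := by
  refine ⟨?_, ?_, Or.inl ⟨rfl, rfl⟩, ?_, ?_⟩ <;>
    intro x <;> simp [PySem.Dict.get?_empty, PySem.Dict.getD_empty, irange]

-- recursive form of the balance condition in Pre_
def balPre : Nat → List (List Int) → Prop
  | _, [] => True
  | k, op :: rest => if op.headD 0 = 1 then balPre (k + 1) rest else 0 < k ∧ balPre (k - 1) rest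

lemma pre_to_bal : ∀ (a : List (List Int)) (k : Nat),
    (∀ i ∈ List.range (a.length + 1),
      (a.take i).countP (fun op => !(op.headD 0 == 1)) ≤
        k + (a.take i).countP (fun op => op.headD 0 == 1)) →
    balPre k a := by
  intro a
  induction a with
  | nil => intro k _; trivial
  | cons op rest ih =>
    intro k h
    by_cases hk : op.headD 0 = 1
    · have hb1 : (op.headD 0 == 1) = true := beq_iff_eq.mpr hk
      have hb2 : (!(op.headD 0 == 1)) = false := by rw [hb1]; rfl
      rw [show balPre k (op :: rest) = if op.headD 0 = 1 then balPre (k + 1) rest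
          else 0 < k ∧ balPre (k - 1) rest from rfl, if_pos hk]
      apply ih
      intro i hi
      have hh := h (i + 1) (by simp at hi ⊢; omega)
      rw [List.take_succ_cons, List.countP_cons, List.countP_cons, hb1] at hh
      rw [show (if (!true) = true then 1 else 0) = 0 from rfl,
        show (if true = true then 1 else 0) = 1 from rfl] at hh
      omega
    · have hb1 : (op.headD 0 == 1) = false := by simpa using hk
      have hb2 : (!(op.headD 0 == 1)) = true := by rw [hb1]; rfl
      rw [show balPre k (op :: rest) = if op.headD 0 = 1 then balPre (k + 1) rest
          else 0 < k ∧ balPre (k - 1) rest from rfl, if_neg hk]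
      have h1 := h 1 (by simp)
      rw [List.take_succ_cons, List.take_zero, List.countP_cons, List.countP_cons, hb1] at h1
      rw [show (if (!false) = true then 1 else 0) = 1 from rfl,
        show (if false = true then 1 else 0) = 0 from rfl] at h1
      simp only [List.countP_nil] at h1
      refine ⟨by omega, ?_⟩
      apply ih
      intro i hi
      have hh := h (i + 1) (by simp at hi ⊢; omega)
      rw [List.take_succ_cons, List.countP_cons, List.countP_cons, hb1] at hh
      rw [show (if (!false) = true then 1 else 0) = 1 from rfl,
        show (if false = true then 1 else 0) = 0 from rfl] at hh
      omega

lemma fold_sim : ∀ (a : List (List Int)) (d : PySem.Dict Int Int)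
    (em : PySem.Dict Int (List Int)) (maxfe : Int) (cnt : PySem.Dict Int Int)
    (stack : List (Int × Int)) (ans : List Int),
    (∀ op ∈ a, 2 ≤ op.length) → balPre stack.length a → InvS d em maxfe cnt stack →
    (a.foldl stepA (d, em, maxfe, ans)).2.2.2 = (a.foldl stepB (cnt, stack, ans)).2.2 := by
  intro a
  induction a with
  | nil => intros; rfl
  | cons op rest ih =>
    intro d em maxfe cnt stack ans hlen hbal I
    rw [List.foldl_cons, List.foldl_cons]
    have hop : 2 ≤ op.length := hlen op (List.mem_cons_self)
    have hk0 : PySem.List.pyGetD op 0 0 = op.headD 0 := pyGetD_head hop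
    rw [show balPre stack.length (op :: rest) = if op.headD 0 = 1 then
        balPre (stack.length + 1) rest else 0 < stack.length ∧ balPre (stack.length - 1) rest
        from rfl] at hbal
    by_cases hk : op.headD 0 = 1
    · -- push
      rw [if_pos hk] at hbal
      rw [stepA_push (by rw [hk0]; exact hk), stepB_push (by rw [hk0]; exact hk)]
      have hI := inv_push I (PySem.List.pyGetD op 1 0)
      have hg : d.getD (PySem.List.pyGetD op 1 0) 0 = cnt.getD (PySem.List.pyGetD op 1 0) 0 :=
        getD_eq_of_get?_eq I.1 _ 0
      rw [hg] at hI ⊢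
      exact ih _ _ _ _ _ _ (fun o ho => hlen o (List.mem_cons_of_mem _ ho))
        (by simpa using hbal) hI
    · -- pop
      rw [if_neg hk] at hbal
      obtain ⟨hpos, hbal'⟩ := hbal
      have hne : stack ≠ [] := by
        intro hnil
        rw [hnil] at hpos
        simp at hpos
      obtain ⟨e, u, w, hS, hmax, hrlm, hlast, he1, hdq, hI, hlenuw⟩ := inv_pop I hne
      rw [stepA_pop (by rw [hk0]; exact hk), stepB_pop (by rw [hk0]; exact hk)]
      rw [hmax, hrlm]
      simp only [List.reverse_reverse]
      rw [hlast, hdq, he1]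
      rw [hdq, he1] at hI
      exact ih _ _ _ _ _ _ (fun o ho => hlen o (List.mem_cons_of_mem _ ho))
        (by rw [show (u ++ w).length = stack.length - 1 by omega]; exact hbal') hI

-- ===== VERDICT (by name: the statement is the Claim_ definition above) =====
theorem solve_spec : Claim_equal_solve := by
  unfold Claim_equal_solve
  intro a _hdom hpre
  unfold Spec_solve solve solve_alt
  obtain ⟨hlen, hbalP⟩ := hpre
  exact (fold_sim a _ _ _ _ _ _ hlen
    (pre_to_bal a 0 (by intro i hi; simpa using hbalP i hi)) inv_empty)
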